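-- pv_equiv track=rewrite | github.com/Nuullll/google-kickstart | 2019/Practice/hard.py | get_array
-- ===== SOURCE A (Python) =====
-- def get_array(N, x1, y1, C, D, E1, E2, F):
--     X = [x1 % F]
--     Y = [y1 % F]
--     A = [(x1 + y1) % F]
--     C %= F
--     D %= F
--     E1 %= F
--     E2 %= F
--
--     for i in range(1, N):
--         x_next = (C * X[-1] + D * Y[-1] + E1) % F
--         y_next = (D * X[-1] + C * Y[-1] + E2) % F
--         X.append(x_next)
--         Y.append(y_next)
--         A.append((x_next + y_next) % F)
--
--     return A
-- ===== SOURCE B (Python) =====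
-- def get_array(N, x1, y1, C, D, E1, E2, F):
--     # s_i = (X[i] + Y[i]) % F satisfies the single scalar recurrence
--     # s_{i+1} = ((C+D)*s_i + (E1+E2)) % F, so the X and Y lists are unnecessary.
--     cd = (C + D) % F
--     e = (E1 + E2) % F
--     s = (x1 + y1) % F
--     res = [s]
--     for _ in range(1, N):
--         s = (cd * s + e) % F
--         res.append(s)
--     return res
-- ===== Notes on version B (the rewrite author's own statement) =====
-- stated objective: faster
-- what changed: Collapses the two coupled recurrences X,Y into one scalar recurrence s=(C+D)*s+(E1+E2) mod F, dropping the X and Y lists entirely and keeping only the running value.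
import Mathlib
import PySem

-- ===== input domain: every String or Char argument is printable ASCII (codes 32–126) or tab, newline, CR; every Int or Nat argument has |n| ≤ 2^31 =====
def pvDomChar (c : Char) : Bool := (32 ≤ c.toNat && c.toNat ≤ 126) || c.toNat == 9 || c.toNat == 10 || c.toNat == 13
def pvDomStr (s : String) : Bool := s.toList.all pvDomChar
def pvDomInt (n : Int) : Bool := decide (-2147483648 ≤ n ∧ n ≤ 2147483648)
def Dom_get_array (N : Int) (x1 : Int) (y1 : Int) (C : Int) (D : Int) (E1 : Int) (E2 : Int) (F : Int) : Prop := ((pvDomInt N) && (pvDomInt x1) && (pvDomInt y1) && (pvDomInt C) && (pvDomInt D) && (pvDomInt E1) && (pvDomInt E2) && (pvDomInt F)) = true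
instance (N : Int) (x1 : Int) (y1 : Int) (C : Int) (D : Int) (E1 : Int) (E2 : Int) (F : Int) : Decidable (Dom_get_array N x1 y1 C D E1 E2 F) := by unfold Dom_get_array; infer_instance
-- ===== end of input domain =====

-- B collapses the two coupled recurrences X, Y into the single scalar recurrence
-- s = ((C+D)*s + (E1+E2)) % F (objective: faster by a constant factor — one state value
-- and one mul/mod per step instead of three lists and six).


-- ===== PORT A =====
-- X[-1]/Y[-1] are ported as pyGetD _ (-1) 0: the lists always hold at least their initial
-- element, so the default 0 is never returned and the indexing is exact.
def get_array (N : Int) (x1 : Int) (y1 : Int) (C : Int) (D : Int) (E1 : Int) (E2 : Int) (F : Int) : List Int :=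
  let X : List Int := [PySem.Int.mod x1 F]
  let Y : List Int := [PySem.Int.mod y1 F]
  let A : List Int := [PySem.Int.mod (x1 + y1) F]
  let Cm := PySem.Int.mod C F
  let Dm := PySem.Int.mod D F
  let E1m := PySem.Int.mod E1 F
  let E2m := PySem.Int.mod E2 F
  ((PySem.List.pyRange 1 N 1).foldl
    (fun st _ =>
      let x_next := PySem.Int.mod (Cm * PySem.List.pyGetD st.1 (-1) 0 + Dm * PySem.List.pyGetD st.2.1 (-1) 0 + E1m) F
      let y_next := PySem.Int.mod (Dm * PySem.List.pyGetD st.1 (-1) 0 + Cm * PySem.List.pyGetD st.2.1 (-1) 0 + E2m) F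
      (st.1 ++ [x_next], st.2.1 ++ [y_next], st.2.2 ++ [PySem.Int.mod (x_next + y_next) F]))
    (X, Y, A)).2.2

-- ===== PORT B =====
def get_array_alt (N : Int) (x1 : Int) (y1 : Int) (C : Int) (D : Int) (E1 : Int) (E2 : Int) (F : Int) : List Int :=
  let cd := PySem.Int.mod (C + D) F
  let e := PySem.Int.mod (E1 + E2) F
  let s0 := PySem.Int.mod (x1 + y1) F
  ((PySem.List.pyRange 1 N 1).foldl
    (fun st _ =>
      let s' := PySem.Int.mod (cd * st.1 + e) F
      (s', st.2 ++ [s']))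
    (s0, [s0])).2

-- ===== PRECONDITION & SPEC =====
-- Pre_ excludes exactly F = 0, where Python's '%' raises ZeroDivisionError (in A and in B).
def Pre_get_array (N : Int) (x1 : Int) (y1 : Int) (C : Int) (D : Int) (E1 : Int) (E2 : Int) (F : Int) : Prop := F ≠ 0
instance (N : Int) (x1 : Int) (y1 : Int) (C : Int) (D : Int) (E1 : Int) (E2 : Int) (F : Int) : Decidable (Pre_get_array N x1 y1 C D E1 E2 F) := by unfold Pre_get_array; infer_instance
def pvWitness_get_array : Int × Int × Int × Int × Int × Int × Int × Int := (5, 3, 7, 2, 4, 1, 6, 11)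

def Spec_get_array (N : Int) (x1 : Int) (y1 : Int) (C : Int) (D : Int) (E1 : Int) (E2 : Int) (F : Int) (out : List Int) : Prop := out = get_array_alt N x1 y1 C D E1 E2 F
instance (N : Int) (x1 : Int) (y1 : Int) (C : Int) (D : Int) (E1 : Int) (E2 : Int) (F : Int) (out : List Int) : Decidable (Spec_get_array N x1 y1 C D E1 E2 F out) := by unfold Spec_get_array; infer_instance

-- ===== CLAIM (what is proved, stated in full; the proofs are below) =====
def Claim_equal_get_array : Prop := ∀ (N : Int) (x1 : Int) (y1 : Int) (C : Int) (D : Int) (E1 : Int) (E2 : Int) (F : Int), Dom_get_array N x1 y1 C D E1 E2 F → Pre_get_array N x1 y1 C D E1 E2 F → Spec_get_array N x1 y1 C D E1 E2 F (get_array N x1 y1 C D E1 E2 F)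

-- ===== LEMMAS AND PROOFS =====

-- last element of an appended singleton, through Python indexing
theorem pyGetD_append_neg_one (xs : List Int) (a : Int) :
    PySem.List.pyGetD (xs ++ [a]) (-1) 0 = a := by
  simp [PySem.List.pyGetD, PySem.List.pyGet?, PySem.List.pyIdx?]

-- PySem.Int.mod (= Int.fmod) depends only on the Euclidean residue
theorem fmod_congr {a b F : Int} (h : a % F = b % F) :
    PySem.Int.mod a F = PySem.Int.mod b F := by
  unfold PySem.Int.mod
  rw [Int.fmod_eq_emod, Int.fmod_eq_emod, h]
  have hdvd : (F ∣ a) ↔ (F ∣ b) := by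
    constructor <;> intro hd
    · exact Int.dvd_of_emod_eq_zero (h ▸ Int.emod_eq_zero_of_dvd hd)
    · exact Int.dvd_of_emod_eq_zero (h.symm ▸ Int.emod_eq_zero_of_dvd hd)
  by_cases h0 : (0:Int) ≤ F <;> simp [h0, hdvd]

-- PySem.Int.mod a F is congruent to a modulo F
theorem fmod_modeq (a F : Int) : Int.ModEq F (PySem.Int.mod a F) a := by
  unfold PySem.Int.mod Int.ModEq
  rw [Int.fmod_eq_emod]
  split_ifs with h
  · simp [Int.emod_emod_of_dvd]
  · rw [Int.add_emod_right, Int.emod_emod_of_dvd _ dvd_rfl]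

-- the scalar step equals the coupled step, given the invariant s ≡ x + y
theorem step_eq (Cm Dm E1m E2m cd e F x y s : Int)
    (hs : s = PySem.Int.mod (x + y) F)
    (hcd : cd % F = (Cm + Dm) % F) (he : e % F = (E1m + E2m) % F) :
    PySem.Int.mod (cd * s + e) F
      = PySem.Int.mod (PySem.Int.mod (Cm * x + Dm * y + E1m) F + PySem.Int.mod (Dm * x + Cm * y + E2m) F) F := by
  apply fmod_congr
  have hL : Int.ModEq F (cd * s + e) ((Cm + Dm) * (x + y) + (E1m + E2m)) :=
    Int.ModEq.add (Int.ModEq.mul hcd (hs ▸ fmod_modeq (x + y) F)) he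
  have hR : Int.ModEq F
      (PySem.Int.mod (Cm * x + Dm * y + E1m) F + PySem.Int.mod (Dm * x + Cm * y + E2m) F)
      ((Cm + Dm) * (x + y) + (E1m + E2m)) := by
    have := Int.ModEq.add (fmod_modeq (Cm * x + Dm * y + E1m) F) (fmod_modeq (Dm * x + Cm * y + E2m) F)
    calc (PySem.Int.mod (Cm * x + Dm * y + E1m) F + PySem.Int.mod (Dm * x + Cm * y + E2m) F)
        ≡ (Cm * x + Dm * y + E1m) + (Dm * x + Cm * y + E2m) [ZMOD F] := this
      _ = (Cm + Dm) * (x + y) + (E1m + E2m) := by ring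
  exact hL.trans hR.symm

-- loop invariant: the A-list of port A's fold equals the result list of port B's fold
theorem loop_eq (l : List Int) (Cm Dm E1m E2m cd e F : Int)
    (hcd : cd % F = (Cm + Dm) % F) (he : e % F = (E1m + E2m) % F) :
    ∀ (X Y A : List Int) (s : Int),
    s = PySem.Int.mod (PySem.List.pyGetD X (-1) 0 + PySem.List.pyGetD Y (-1) 0) F →
    (l.foldl
      (fun st _ =>
        let x_next := PySem.Int.mod (Cm * PySem.List.pyGetD st.1 (-1) 0 + Dm * PySem.List.pyGetD st.2.1 (-1) 0 + E1m) F
        let y_next := PySem.Int.mod (Dm * PySem.List.pyGetD st.1 (-1) 0 + Cm * PySem.List.pyGetD st.2.1 (-1) 0 + E2m) F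
        (st.1 ++ [x_next], st.2.1 ++ [y_next], st.2.2 ++ [PySem.Int.mod (x_next + y_next) F]))
      (X, Y, A)).2.2
    = (l.foldl
        (fun st _ =>
          let s' := PySem.Int.mod (cd * st.1 + e) F
          (s', st.2 ++ [s']))
        (s, A)).2 := by
  induction l with
  | nil => intro X Y A s _; rfl
  | cons hd tl ih =>
    intro X Y A s hs
    simp only [List.foldl_cons]
    have hstep := step_eq Cm Dm E1m E2m cd e F
      (PySem.List.pyGetD X (-1) 0) (PySem.List.pyGetD Y (-1) 0) s hs hcd he
    rw [hstep]
    exact ih _ _ _ _ (by rw [pyGetD_append_neg_one, pyGetD_append_neg_one])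

-- ===== VERDICT (by name: the statement is the Claim_ definition above) =====
theorem get_array_spec : Claim_equal_get_array := by
  intro N x1 y1 C D E1 E2 F _ _
  unfold Spec_get_array get_array get_array_alt
  simp only []
  refine (loop_eq _ _ _ _ _ _ _ _ ?_ ?_ _ _ _ _ ?_).symm ▸ rfl
  · exact ((fmod_modeq (C + D) F).trans
      (Int.ModEq.add ((fmod_modeq C F).symm) ((fmod_modeq D F).symm)))
  · exact ((fmod_modeq (E1 + E2) F).trans
      (Int.ModEq.add ((fmod_modeq E1 F).symm) ((fmod_modeq E2 F).symm)))
  · exact (fmod_congr (((fmod_modeq x1 F).add (fmod_modeq y1 F)) : _ % F = _ % F)).symm
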